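-- pv_equiv track=rewrite | github.com/Olof233/bizcon_local | evaluators/business_value.py | _count_business_value_tools
-- ===== SOURCE A (Python) =====
-- from typing import Dict, List, Any, Optional
--
-- def _count_business_value_tools(tool_calls: List[Dict[str, Any]], relevant_tools: List[str]) -> int:
--     """
--     Count how many business-relevant tools were used effectively.
--
--     Args:
--         tool_calls: List of tool calls made
--         relevant_tools: List of tool IDs that are relevant for this scenario
--
--     Returns:
--         Number of business-relevant tools used effectively
--     """
--     if not relevant_tools:
--         return 0
--
--     business_value_tools = 0
--
--     for tool_call in tool_calls:
--         tool_id = tool_call.get("tool_id", "")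
--
--         if tool_id in relevant_tools:
--             # In a more sophisticated implementation, also check if the tool was used correctly
--             business_value_tools += 1
--
--     return business_value_tools
-- ===== SOURCE B (Python) =====
-- def _count_business_value_tools(tool_calls, relevant_tools):
--     # Build a frequency table of tool ids once, then sum it over the distinct relevant tools.
--     cnt = {}
--     for tc in tool_calls:
--         tid = tc.get("tool_id", "")
--         cnt[tid] = cnt.get(tid, 0) + 1
--     return sum(cnt.get(t, 0) for t in set(relevant_tools))
-- ===== Notes on version B (the rewrite author's own statement) =====
-- stated objective: faster
-- what changed: Inverted traversal: B builds a frequency table of tool ids in one pass and sums the counts over the distinct relevant tools, removing A's per-call linear membership scan of relevant_tools.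
import Mathlib
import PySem

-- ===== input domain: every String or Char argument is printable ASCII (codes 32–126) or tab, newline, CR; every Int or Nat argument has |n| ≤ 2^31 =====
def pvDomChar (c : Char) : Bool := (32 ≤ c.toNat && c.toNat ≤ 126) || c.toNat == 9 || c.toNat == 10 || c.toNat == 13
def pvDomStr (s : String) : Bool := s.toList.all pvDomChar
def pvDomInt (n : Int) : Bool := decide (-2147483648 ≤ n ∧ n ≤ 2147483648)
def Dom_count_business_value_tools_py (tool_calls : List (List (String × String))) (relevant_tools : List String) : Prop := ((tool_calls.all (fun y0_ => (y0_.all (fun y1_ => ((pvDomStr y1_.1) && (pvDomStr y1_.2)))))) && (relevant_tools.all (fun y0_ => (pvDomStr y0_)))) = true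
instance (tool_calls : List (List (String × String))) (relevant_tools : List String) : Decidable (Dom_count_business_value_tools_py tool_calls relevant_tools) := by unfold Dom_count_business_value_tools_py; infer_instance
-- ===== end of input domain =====

-- ===== PORT A =====
-- Header: B builds a frequency table of tool ids once and sums it over the distinct
-- relevant tools (alternative decomposition); A scans calls testing list membership.
def count_business_value_tools_py (tool_calls : List (List (String × String))) (relevant_tools : List String) : Int :=
  if relevant_tools = [] then 0
  else
    tool_calls.foldl
      (fun acc tool_call =>
        let tool_id := PySem.Dict.getD (PySem.Dict.mk tool_call) "tool_id" ""
        if relevant_tools.contains tool_id then acc + 1 else acc)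
      0

-- ===== PORT B =====
def count_business_value_tools_py_alt (tool_calls : List (List (String × String))) (relevant_tools : List String) : Int :=
  let cnt : PySem.Dict String Int :=
    tool_calls.foldl
      (fun d tc =>
        let tid := PySem.Dict.getD (PySem.Dict.mk tc) "tool_id" ""
        d.insert tid (d.getD tid 0 + 1))
      PySem.Dict.empty
  ((PySem.Set.ofList relevant_tools).map (fun t => cnt.getD t 0)).sum

-- ===== PRECONDITION & SPEC =====
def Spec_count_business_value_tools_py (tool_calls : List (List (String × String))) (relevant_tools : List String) (out : Int) : Prop := out = count_business_value_tools_py_alt tool_calls relevant_tools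
instance (tool_calls : List (List (String × String))) (relevant_tools : List String) (out : Int) : Decidable (Spec_count_business_value_tools_py tool_calls relevant_tools out) := by unfold Spec_count_business_value_tools_py; infer_instance

-- ===== CLAIM (what is proved, stated in full; the proofs are below) =====
def Claim_equal_count_business_value_tools_py : Prop := ∀ (tool_calls : List (List (String × String))) (relevant_tools : List String), Dom_count_business_value_tools_py tool_calls relevant_tools → Spec_count_business_value_tools_py tool_calls relevant_tools (count_business_value_tools_py tool_calls relevant_tools)

-- ===== LEMMAS AND PROOFS =====

-- summing the indicator (x == t) over a Nodup list is 1 or 0 by membership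
lemma pv_sum_indicator (x : String) (s : List String) (hs : s.Nodup) :
    (s.map (fun t => if x == t then (1 : Int) else 0)).sum
      = if x ∈ s then 1 else 0 := by
  induction s with
  | nil => simp
  | cons y ys ih =>
    rw [List.nodup_cons] at hs
    obtain ⟨hy, hys⟩ := hs
    simp only [List.map_cons, List.sum_cons, ih hys, List.mem_cons]
    by_cases hxy : x = y
    · subst hxy
      simp [hy]
    · simp [hxy]

-- the counting pass over the distinct keys equals the membership-filtered count
lemma pv_sum_count (ids : List String) (s : List String) (hs : s.Nodup) :
    (s.map (fun t => ((ids.count t : Nat) : Int))).sum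
      = ((ids.countP (fun x => s.contains x) : Nat) : Int) := by
  induction ids with
  | nil => simp
  | cons x xs ih =>
    have hcnt : ∀ t : String, ((x :: xs).count t : Int)
        = (xs.count t : Int) + (if x == t then (1 : Int) else 0) := by
      intro t
      by_cases h : x = t <;> simp [h]
    have : (s.map (fun t => (((x :: xs).count t : Nat) : Int))).sum
        = (s.map (fun t => ((xs.count t : Nat) : Int))).sum
          + (s.map (fun t => if x == t then (1 : Int) else 0)).sum := by
      rw [← List.sum_map_add]
      exact List.map_congr_left (fun t _ => hcnt t) ▸ rfl
    rw [this, ih, pv_sum_indicator x s hs, List.countP_cons]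
    by_cases hx : x ∈ s <;> simp [hx]

-- ===== VERDICT (by name: the statement is the Claim_ definition above) =====
theorem count_business_value_tools_py_spec : Claim_equal_count_business_value_tools_py := by
  intro tool_calls relevant_tools _
  unfold Spec_count_business_value_tools_py count_business_value_tools_py count_business_value_tools_py_alt
  by_cases hrel : relevant_tools = []
  · subst hrel
    simp [PySem.Set.ofList]
  · rw [if_neg hrel]
    rw [PySem.List.foldl_if_add_one
      (p := fun tc : List (String × String) =>
        relevant_tools.contains (PySem.Dict.getD (PySem.Dict.mk tc) "tool_id" ""))]
    rw [← List.foldl_map (f := fun tc : List (String × String) =>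
        PySem.Dict.getD (PySem.Dict.mk tc) "tool_id" "")
        (g := fun (d : PySem.Dict String Int) x => d.insert x (d.getD x 0 + 1))]
    simp only [PySem.Dict.getD_foldl_insert_add_one, PySem.Dict.getD_empty, zero_add]
    rw [pv_sum_count _ _ (PySem.Set.nodup_ofList relevant_tools)]
    rw [List.countP_map]
    congr 1
    apply List.countP_congr
    intro tc _
    simp [PySem.Set.mem_ofList]
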